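-- pv_equiv track=rewrite | github.com/lijianqiao/ncm | backend/app/crud/base.py | _parse_filter_key
-- ===== SOURCE A (Python) =====
-- def _parse_filter_key(key: str) -> tuple[str, str]:
--     """解析过滤器键，提取字段名和操作符。
--
--     支持的操作符后缀：
--         - __eq: 等于（默认）
--         - __ne: 不等于
--         - __gt: 大于
--         - __gte: 大于等于
--         - __lt: 小于
--         - __lte: 小于等于
--         - __in: 在列表中
--         - __not_in: 不在列表中
--         - __is: IS（用于布尔/NULL）
--         - __is_not: IS NOT
--         - __like: LIKE 模式匹配
--         - __ilike: ILIKE 模式匹配（不区分大小写）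
--         - __contains: JSONB 数组包含
--
--     Args:
--         key: 过滤器键（如 "status" 或 "created_at__gte"）
--
--     Returns:
--         (field_name, operator): 字段名和操作符
--     """
--     operators = (
--         "__gte", "__lte", "__gt", "__lt",
--         "__in", "__not_in",
--         "__is", "__is_not",
--         "__like", "__ilike",
--         "__contains",
--         "__ne", "__eq",
--     )
--     for op in operators:
--         if key.endswith(op):
--             return key[: -len(op)], op[2:]  # 去掉 "__" 前缀
--     return key, "eq"
-- ===== SOURCE B (Python) =====
-- _OPS = {
--     "eq", "ne", "gt", "gte", "lt", "lte",
--     "in", "not_in", "is", "is_not",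
--     "like", "ilike", "contains",
-- }
--
--
-- def _parse_filter_key(key: str) -> tuple[str, str]:
--     idx = key.rfind("__")
--     if idx != -1:
--         op = key[idx + 2:]
--         if op in _OPS:
--             return key[:idx], op
--     return key, "eq"
-- ===== Notes on version B (the rewrite author's own statement) =====
-- stated objective: simpler
-- what changed: Replaces the 13-iteration scan over operator suffixes with a single rfind of the double-underscore separator plus one set-membership test on the part after it.
import Mathlib
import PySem

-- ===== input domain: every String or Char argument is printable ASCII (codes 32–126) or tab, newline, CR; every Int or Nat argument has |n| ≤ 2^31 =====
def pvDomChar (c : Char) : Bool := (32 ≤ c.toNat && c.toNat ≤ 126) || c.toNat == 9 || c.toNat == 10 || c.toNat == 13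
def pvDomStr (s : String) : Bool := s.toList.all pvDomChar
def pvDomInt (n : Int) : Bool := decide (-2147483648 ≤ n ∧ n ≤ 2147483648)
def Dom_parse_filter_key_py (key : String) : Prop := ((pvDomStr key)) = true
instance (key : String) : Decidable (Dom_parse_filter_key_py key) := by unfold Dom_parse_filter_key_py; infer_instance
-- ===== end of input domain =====

-- B replaces A's scan over 13 operator suffixes by one rfind of the double-underscore separator plus a set lookup (objective: simpler).

-- ===== PORT A =====
def pvOpsA : List String :=
  ["__gte", "__lte", "__gt", "__lt",
   "__in", "__not_in",
   "__is", "__is_not",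
   "__like", "__ilike",
   "__contains",
   "__ne", "__eq"]

-- the 'for op in operators: if key.endswith(op): return …' loop, with its early return
def pvGoA (key : String) : List String → String × String
  | [] => (key, "eq")
  | op :: rest =>
    if PySem.Str.endswith key op then
      (PySem.Str.slice key none (some (-(PySem.Str.len op))), PySem.Str.slice op (some 2) none)
    else pvGoA key rest

def parse_filter_key_py (key : String) : String × String :=
  pvGoA key pvOpsA

-- ===== PORT B =====
-- the Python set literal _OPS (13 distinct elements)
def pvOpsB : PySem.Set String :=
  PySem.Set.ofList
    ["eq", "ne", "gt", "gte", "lt", "lte",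
     "in", "not_in", "is", "is_not",
     "like", "ilike", "contains"]

def parse_filter_key_py_alt (key : String) : String × String :=
  let idx := PySem.Str.rfind key "__"
  if idx ≠ -1 then
    let op := PySem.Str.slice key (some (idx + 2)) none
    if PySem.Set.contains pvOpsB op then (PySem.Str.slice key none (some idx), op)
    else (key, "eq")
  else (key, "eq")

-- ===== PRECONDITION & SPEC =====
def Spec_parse_filter_key_py (key : String) (out : String × String) : Prop := out = parse_filter_key_py_alt key
instance (key : String) (out : String × String) : Decidable (Spec_parse_filter_key_py key out) := by unfold Spec_parse_filter_key_py; infer_instance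

-- ===== CLAIM (what is proved, stated in full; the proofs are below) =====
def Claim_equal_parse_filter_key_py : Prop := ∀ (key : String), Dom_parse_filter_key_py key → Spec_parse_filter_key_py key (parse_filter_key_py key)

-- ===== LEMMAS AND PROOFS =====

-- spec of the rfind scan loop: it returns the HIGHEST index ≤ i at which sub is a prefix of s.drop, or -1
theorem pv_go_spec (sub s : List Char) : ∀ (i : Nat),
    (PySem.Chars.rfind.go s sub i = -1 ∧ ∀ k ≤ i, ¬ sub <+: s.drop k) ∨
    (∃ j : Nat, j ≤ i ∧ PySem.Chars.rfind.go s sub i = (j : Int) ∧ sub <+: s.drop j ∧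
      ∀ k, j < k → k ≤ i → ¬ sub <+: s.drop k) := by
  intro i
  induction i with
  | zero =>
    by_cases h : sub.isPrefixOf s
    · right
      exact ⟨0, le_refl _, by simp [PySem.Chars.rfind.go, h], by
        simpa using (PySem.Chars.startswith_iff s sub).mp h, by omega⟩
    · left
      refine ⟨by simp [PySem.Chars.rfind.go, h], ?_⟩
      intro k hk
      interval_cases k
      simpa using fun hp => h ((PySem.Chars.startswith_iff s sub).mpr (by simpa using hp))
  | succ i ih =>
    by_cases h : sub.isPrefixOf (s.drop (i + 1))
    · right
      exact ⟨i + 1, le_refl _, by simp [PySem.Chars.rfind.go, h],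
        (PySem.Chars.startswith_iff _ sub).mp h, by omega⟩
    · have hgo : PySem.Chars.rfind.go s sub (i + 1) = PySem.Chars.rfind.go s sub i := by
        simp [PySem.Chars.rfind.go, h]
      have hnot : ¬ sub <+: s.drop (i + 1) :=
        fun hp => h ((PySem.Chars.startswith_iff _ sub).mpr hp)
      rcases ih with ⟨h1, h2⟩ | ⟨j, hj, hjv, hjp, hjm⟩
      · left
        refine ⟨hgo.trans h1, ?_⟩
        intro k hk
        rcases Nat.lt_or_ge k (i + 1) with hlt | hge
        · exact h2 k (by omega)
        · have : k = i + 1 := by omega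
          subst this; exact hnot
      · right
        refine ⟨j, by omega, hgo.trans hjv, hjp, ?_⟩
        intro k hk1 hk2
        rcases Nat.lt_or_ge k (i + 1) with hlt | hge
        · exact hjm k hk1 (by omega)
        · have : k = i + 1 := by omega
          subst this; exact hnot

-- spec of rfind itself (for nonempty sub): either no occurrence anywhere, or the last occurrence j
theorem pv_rfind_spec (sub s : List Char) (hsub : sub ≠ []) :
    (PySem.Chars.rfind s sub = -1 ∧ ∀ k, ¬ sub <+: s.drop k) ∨
    (∃ j : Nat, PySem.Chars.rfind s sub = (j : Int) ∧ j + sub.length ≤ s.length ∧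
      sub <+: s.drop j ∧ ∀ k, j < k → ¬ sub <+: s.drop k) := by
  have hout : ∀ k, s.length < k → ¬ sub <+: s.drop k := by
    intro k hk hp
    rw [List.drop_eq_nil_of_le (by omega)] at hp
    exact hsub (List.prefix_nil.mp hp)
  rcases pv_go_spec sub s s.length with ⟨h1, h2⟩ | ⟨j, hj, hjv, hjp, hjm⟩
  · left
    refine ⟨h1, fun k hp => ?_⟩
    by_cases hle : k ≤ s.length
    · exact h2 k hle hp
    · exact hout k (by omega) hp
  · right
    have hlen : j + sub.length ≤ s.length := by
      have := hjp.length_le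
      simp [List.length_drop] at this
      omega
    refine ⟨j, hjv, hlen, hjp, fun k hk hp => ?_⟩
    by_cases hle : k ≤ s.length
    · exact hjm k hk hle hp
    · exact hout k (by omega) hp

-- the loop returns the default when no operator suffix matches
theorem pv_goA_default (key : String) (L : List String)
    (h : ∀ op ∈ L, PySem.Str.endswith key op = false) : pvGoA key L = (key, "eq") := by
  induction L with
  | nil => rfl
  | cons op rest ih =>
    have h0 := h op (by simp)
    simp only [pvGoA]
    rw [h0]
    simp only [Bool.false_eq_true, if_false]
    exact ih (fun o ho => h o (by simp [ho]))

-- no element of pvOpsA is a suffix of a different element (so at most one can match)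
theorem pv_pairwise_A : ∀ o1 ∈ pvOpsA, ∀ o2 ∈ pvOpsA, o1.toList <:+ o2.toList → o1 = o2 := by
  decide

-- every operator in pvOpsA starts with "__"
theorem pv_starts_A : ∀ op ∈ pvOpsA, ['_', '_'] <+: op.toList := by decide

-- "__" does not occur in op.drop 1 for any operator op in pvOpsA
theorem pv_no_u_inside : ∀ op ∈ pvOpsA, PySem.Chars.isIn ['_', '_'] (op.toList.drop 1) = false := by
  decide

-- the bare name (operator minus "__") of each A-operator is in B's set
theorem pv_bare_in_B : ∀ op ∈ pvOpsA,
    PySem.Set.contains pvOpsB (String.ofList (op.toList.drop 2)) = true := by decide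

-- each member of B's set, prefixed with "__", is in A's list
theorem pv_full_in_A : ∀ b ∈ (pvOpsB : List String),
    String.ofList ('_' :: '_' :: b.toList) ∈ pvOpsA := by decide

-- if the (unique) matching operator is in the scanned list, the loop returns its split
theorem pv_goA_match (key opfull : String) (hsfx : PySem.Str.endswith key opfull = true) :
    ∀ L, (∀ x ∈ L, x ∈ pvOpsA) → opfull ∈ L →
    pvGoA key L = (PySem.Str.slice key none (some (-(PySem.Str.len opfull))),
                   PySem.Str.slice opfull (some 2) none) := by
  intro L
  induction L with
  | nil => intro _ h; simp at h
  | cons op rest ih =>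
    intro hsub hmem
    by_cases h : PySem.Str.endswith key op
    · have hopA : op ∈ pvOpsA := hsub op (by simp)
      have hfullA : opfull ∈ pvOpsA := hsub opfull hmem
      have h1 : op.toList <:+ key.toList := by
        have := (PySem.Str.endswith_eq key op) ▸ h
        exact (PySem.Chars.endswith_iff _ _).mp this
      have h2 : opfull.toList <:+ key.toList := by
        have := (PySem.Str.endswith_eq key opfull) ▸ hsfx
        exact (PySem.Chars.endswith_iff _ _).mp this
      have heq : op = opfull := by
        rcases List.suffix_or_suffix_of_suffix h1 h2 with hc | hc
        · exact pv_pairwise_A op hopA opfull hfullA hc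
        · exact (pv_pairwise_A opfull hfullA op hopA hc).symm
      subst heq
      simp only [pvGoA]
      rw [h]
      simp
    · have hne : opfull ≠ op := fun he => h (he ▸ hsfx)
      have hmem' : opfull ∈ rest := by
        rcases List.mem_cons.mp hmem with he | hm
        · exact absurd he hne
        · exact hm
      simp only [pvGoA]
      rw [show PySem.Str.endswith key op = false by
        cases hh : PySem.Str.endswith key op
        · rfl
        · exact absurd hh h]
      simp only [Bool.false_eq_true, if_false]
      exact ih (fun x hx => hsub x (by simp [hx])) hmem'

-- no operator of pvOpsA is a suffix of key when "__" occurs nowhere in key after position j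
theorem pv_all_false_of_no_u (key : String)
    (h : ∀ k, ¬ ['_', '_'] <+: key.toList.drop k) :
    ∀ op ∈ pvOpsA, PySem.Str.endswith key op = false := by
  intro op hop
  by_contra hne
  have hs : op.toList <:+ key.toList := by
    have : PySem.Str.endswith key op = true := by
      cases hh : PySem.Str.endswith key op
      · exact absurd hh hne
      · rfl
    have := (PySem.Str.endswith_eq key op) ▸ this
    exact (PySem.Chars.endswith_iff _ _).mp this
  rcases hs with ⟨pre, hpre⟩
  have hdrop : key.toList.drop pre.length = op.toList := by
    rw [← hpre]; simp
  exact h pre.length (hdrop ▸ pv_starts_A op hop)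

-- the first components of both results, as toLists
theorem pv_toList_sliceA (key op : String) (hne : op.toList ≠ []) :
    (PySem.Str.slice key none (some (-(PySem.Str.len op)))).toList
      = key.toList.take (key.toList.length - op.toList.length) := by
  have hpos : 0 < op.toList.length := List.length_pos_of_ne_nil hne
  rw [PySem.Str.len_eq]
  rw [PySem.Str.toList_slice]
  simp only [PySem.Chars.slice_eq_listSlice]
  rw [PySem.List.slice_to_neg_natCast _ _ hpos]

theorem pv_toList_sliceB_take (key : String) (j : Nat) :
    (PySem.Str.slice key none (some (j : Int))).toList = key.toList.take j := by
  rw [PySem.Str.toList_slice]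
  simp only [PySem.Chars.slice_eq_listSlice]
  exact PySem.List.slice_to_natCast _ _

theorem pv_toList_slice_drop (key : String) (j : Nat) :
    (PySem.Str.slice key (some (j : Int)) none).toList = key.toList.drop j := by
  rw [PySem.Str.toList_slice]
  simp only [PySem.Chars.slice_eq_listSlice]
  exact PySem.List.slice_from_natCast _ _

-- ===== VERDICT (by name: the statement is the Claim_ definition above) =====
set_option maxHeartbeats 1000000 in
theorem parse_filter_key_py_spec : Claim_equal_parse_filter_key_py := by
  intro key _
  unfold Spec_parse_filter_key_py parse_filter_key_py parse_filter_key_py_alt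
  have husub : (['_', '_'] : List Char) ≠ [] := by simp
  have hrf : PySem.Str.rfind key "__" = PySem.Chars.rfind key.toList ['_', '_'] := by
    rw [PySem.Str.rfind_eq]; rfl
  rcases pv_rfind_spec ['_', '_'] key.toList husub with ⟨h1, h2⟩ | ⟨j, hjv, hjlen, hjp, hjm⟩
  · -- no "__" anywhere: both sides return (key, "eq")
    rw [pv_goA_default key pvOpsA (pv_all_false_of_no_u key h2)]
    simp only [hrf, h1]
    simp
  · -- last occurrence of "__" at index j
    have hj2 : j + 2 ≤ key.toList.length := by simpa using hjlen
    have hne1 : ((j : Int)) ≠ -1 := by omega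
    have hsplit : key.toList.drop j = '_' :: '_' :: key.toList.drop (j + 2) := by
      rcases hjp with ⟨t, ht⟩
      have h2t : t = key.toList.drop (j + 2) := by
        have := congrArg (List.drop 2) ht
        simpa [List.drop_drop, Nat.add_comm] using this
      rw [← ht]; simp [h2t]
    simp only [hrf, hjv, ne_eq, hne1, not_false_eq_true, if_true]
    have hopl : (PySem.Str.slice key (some ((j : Int) + 2)) none).toList
        = key.toList.drop (j + 2) := by
      rw [show ((j : Int) + 2) = (((j + 2 : Nat)) : Int) by push_cast; ring]
      exact pv_toList_slice_drop key (j + 2)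
    by_cases hB : pvOpsB.contains (PySem.Str.slice key (some ((j : Int) + 2)) none) = true
    · -- B splits at j; A matches the same (unique) operator
      simp only [hB, if_true]
      have hBmem : PySem.Str.slice key (some ((j : Int) + 2)) none ∈ (pvOpsB : List String) :=
        List.mem_of_elem_eq_true hB
      have hfA : String.ofList ('_' :: '_' ::
          (PySem.Str.slice key (some ((j : Int) + 2)) none).toList) ∈ pvOpsA :=
        pv_full_in_A _ hBmem
      set opfull : String := String.ofList ('_' :: '_' ::
          (PySem.Str.slice key (some ((j : Int) + 2)) none).toList) with hopfull
      have hfl : opfull.toList = '_' :: '_' :: key.toList.drop (j + 2) := by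
        rw [hopfull]; simp [hopl]
      have hflen : opfull.toList.length = key.toList.length - j := by
        rw [hfl]
        simp only [List.length_cons, List.length_drop]
        omega
      have hsfx : PySem.Str.endswith key opfull = true := by
        rw [PySem.Str.endswith_eq]
        apply (PySem.Chars.endswith_iff _ _).mpr
        have : opfull.toList = key.toList.drop j := by rw [hfl, hsplit]
        rw [this]
        exact List.drop_suffix _ _
      rw [pv_goA_match key opfull hsfx pvOpsA (fun x hx => hx) hfA]
      refine congrArg₂ Prod.mk ?_ ?_
      · apply String.toList_inj.mp
        rw [pv_toList_sliceA key opfull (by rw [hfl]; simp)]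
        rw [pv_toList_sliceB_take key j]
        rw [hflen]
        have harith2 : key.toList.length - (key.toList.length - j) = j := by omega
        rw [harith2]
      · apply String.toList_inj.mp
        have h2' : (PySem.Str.slice opfull (some 2) none).toList = opfull.toList.drop 2 := by
          rw [show (2 : Int) = ((2 : Nat) : Int) by simp]
          exact pv_toList_slice_drop opfull 2
        rw [h2', hfl, hopl]
        simp
    · -- the piece after the last "__" is not an operator name: A matches nothing either
      have hall : ∀ op' ∈ pvOpsA, PySem.Str.endswith key op' = false := by
        intro op' hop'
        by_contra hne
        have hs : op'.toList <:+ key.toList := by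
          have hET : PySem.Str.endswith key op' = true := by
            cases hh : PySem.Str.endswith key op'
            · exact absurd hh hne
            · rfl
          have := (PySem.Str.endswith_eq key op') ▸ hET
          exact (PySem.Chars.endswith_iff _ _).mp this
        rcases hs with ⟨pre, hpre⟩
        have hdrop : key.toList.drop pre.length = op'.toList := by
          rw [← hpre]; simp
        have hu : ['_', '_'] <+: key.toList.drop pre.length :=
          hdrop ▸ pv_starts_A op' hop'
        have hple : pre.length ≤ j := by
          by_contra hgt
          exact hjm pre.length (by omega) hu
        rcases Nat.eq_or_lt_of_le hple with heq | hlt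
        · -- the match is exactly at j: then the piece after "__" would be a bare operator name
          have hbB := pv_bare_in_B op' hop'
          have hlists : (PySem.Str.slice key (some ((j : Int) + 2)) none).toList
              = (String.ofList (op'.toList.drop 2)).toList := by
            rw [hopl]; simp
            rw [← hdrop, heq, List.drop_drop]
          rw [String.toList_inj.mp hlists] at hB
          exact hB hbB
        · -- "__" at j strictly inside op': impossible, "__" does not occur in op'.drop 1
          have hinside : ['_', '_'] <+: (op'.toList.drop 1).drop (j - pre.length - 1) := by
            rw [List.drop_drop, ← hdrop, List.drop_drop]
            have harith : pre.length + (1 + (j - pre.length - 1)) = j := by omega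
            rw [harith]
            exact hjp
          have hIn : PySem.Chars.isIn ['_', '_'] (op'.toList.drop 1) = true :=
            (PySem.Chars.exists_prefix_drop_iff_isIn _ _).mp ⟨_, hinside⟩
          rw [pv_no_u_inside op' hop'] at hIn
          exact absurd hIn (by simp)
      rw [Bool.not_eq_true] at hB
      rw [pv_goA_default key pvOpsA hall]
      simp only [hB, Bool.false_eq_true, if_false]
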